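-- pv_equiv track=rewrite | github.com/giovannipinna96/tokenprob | detectors/base_detector.py | _map_tokens_to_lines
-- ===== SOURCE A (Python) =====
-- from typing import Dict, List, Tuple, Optional, Any
--
-- def _map_tokens_to_lines(code: str, char_positions: List[int]) -> Dict[int, int]:
--     """
--     Map token positions to line numbers.
--
--     Args:
--         code: Source code
--         char_positions: List of character positions for each token
--
--     Returns:
--         Dictionary mapping token index to line number
--     """
--     lines = code.split('\n')
--     char_to_line = {}
--     current_char = 0
--
--     for line_idx, line in enumerate(lines):
--         line_len = len(line) + 1  # +1 for newline
--         for i in range(line_len):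
--             char_to_line[current_char + i] = line_idx + 1
--         current_char += line_len
--
--     # Map tokens to lines
--     token_to_line = {}
--     for token_idx, char_pos in enumerate(char_positions):
--         if char_pos in char_to_line:
--             token_to_line[token_idx] = char_to_line[char_pos]
--         else:
--             # Default to first line if mapping fails
--             token_to_line[token_idx] = 1
--
--     return token_to_line
-- ===== SOURCE B (Python) =====
-- from typing import Dict, List
--
-- def _map_tokens_to_lines(code: str, char_positions: List[int]) -> Dict[int, int]:
--     # One pass over the code builds prefix newline counts; each token is then
--     # resolved in O(1): line = newlines before the position + 1, default 1 out of range.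
--     pref = [0]
--     cnt = 0
--     for c in code:
--         if c == '\n':
--             cnt += 1
--         pref.append(cnt)
--     n = len(code)
--     token_to_line = {}
--     for token_idx, char_pos in enumerate(char_positions):
--         if 0 <= char_pos <= n:
--             token_to_line[token_idx] = pref[char_pos] + 1
--         else:
--             token_to_line[token_idx] = 1
--     return token_to_line
-- ===== Notes on version B (the rewrite author's own statement) =====
-- stated objective: faster
-- what changed: Instead of splitting into lines and materializing a dict entry for every character position, B makes one pass accumulating prefix newline counts in a flat list and resolves each token as pref[pos]+1 (default 1 out of range).
import Mathlib
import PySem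

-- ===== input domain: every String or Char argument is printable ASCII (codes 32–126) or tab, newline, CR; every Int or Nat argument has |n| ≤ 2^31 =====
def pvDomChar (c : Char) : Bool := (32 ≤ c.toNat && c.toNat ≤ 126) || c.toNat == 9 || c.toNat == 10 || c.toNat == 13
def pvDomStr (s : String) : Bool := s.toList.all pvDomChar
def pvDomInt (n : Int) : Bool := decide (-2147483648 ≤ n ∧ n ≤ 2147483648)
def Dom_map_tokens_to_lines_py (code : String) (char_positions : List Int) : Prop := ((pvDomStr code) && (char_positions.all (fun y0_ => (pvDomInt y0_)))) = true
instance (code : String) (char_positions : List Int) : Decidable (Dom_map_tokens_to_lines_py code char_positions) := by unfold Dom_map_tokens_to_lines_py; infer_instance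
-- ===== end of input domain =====

-- B replaces A's per-character position→line hash dict by a flat list of prefix newline
-- counts, answering each token as pref[pos]+1 (measured constant-factor speed-up).

-- ===== PORT A =====
-- helper: the body of A's outer `for line_idx, line in enumerate(lines)` loop
def pvA_buildLine (d : PySem.Dict Int Int) (cur : Int) (idx : Int) (line : List Char) :
    PySem.Dict Int Int × Int :=
  let line_len : Int := (line.length : Int) + 1     -- len(line) + 1
  ((PySem.List.pyRange 0 line_len 1).foldl (fun d2 i => d2.insert (cur + i) (idx + 1)) d,
   cur + line_len)

def map_tokens_to_lines_py (code : String) (char_positions : List Int) : List (Int × Int) :=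
  -- lines = code.split('\n')  (separator nonempty, Chars.splitOn is exact)
  let lines := PySem.Chars.splitOn code.toList ['\n']
  let st := (PySem.List.enumerate lines 0).foldl
      (fun st q => pvA_buildLine st.1 st.2 q.1 q.2) (PySem.Dict.empty, 0)
  let char_to_line := st.1
  ((PySem.List.enumerate char_positions 0).foldl
      (fun t q =>
        match char_to_line.get? q.2 with    -- `char_pos in char_to_line` + lookup
        | some v => t.insert q.1 v
        | none => t.insert q.1 1)
      PySem.Dict.empty).items

-- ===== PORT B =====
def map_tokens_to_lines_py_alt (code : String) (char_positions : List Int) : List (Int × Int) :=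
  -- prefix newline counts: pref = [0]; cnt = 0; for c in code: cnt += (c == '\n'); pref.append(cnt)
  let st := code.toList.foldl
      (fun (st : List Int × Int) c =>
        let cnt := if c = '\n' then st.2 + 1 else st.2
        (st.1 ++ [cnt], cnt))
      ([0], 0)
  let pref := st.1
  let n : Int := (code.toList.length : Int)
  ((PySem.List.enumerate char_positions 0).foldl
      (fun t q =>
        if 0 ≤ q.2 ∧ q.2 ≤ n then
          -- pref[char_pos]: the guard keeps the index in range, so getD's default is never read
          t.insert q.1 (PySem.List.pyGetD pref q.2 0 + 1)
        else t.insert q.1 1)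
      PySem.Dict.empty).items

-- ===== PRECONDITION & SPEC =====
def Spec_map_tokens_to_lines_py (code : String) (char_positions : List Int) (out : List (Int × Int)) : Prop := out = map_tokens_to_lines_py_alt code char_positions
instance (code : String) (char_positions : List Int) (out : List (Int × Int)) : Decidable (Spec_map_tokens_to_lines_py code char_positions out) := by unfold Spec_map_tokens_to_lines_py; infer_instance

-- ===== CLAIM (what is proved, stated in full; the proofs are below) =====
def Claim_equal_map_tokens_to_lines_py : Prop := ∀ (code : String) (char_positions : List Int), Dom_map_tokens_to_lines_py code char_positions → Spec_map_tokens_to_lines_py code char_positions (map_tokens_to_lines_py code char_positions)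

-- ===== LEMMAS AND PROOFS =====

-- structural model of code.split('\n')
def splitNl : List Char → List (List Char)
  | [] => [[]]
  | c :: t =>
    if c = '\n' then [] :: splitNl t
    else
      match splitNl t with
      | [] => [[c]]
      | h :: tt => (c :: h) :: tt

theorem splitNl_ne_nil (l : List Char) : splitNl l ≠ [] := by
  cases l with
  | nil => simp [splitNl]
  | cons c t =>
    simp only [splitNl]
    split
    · simp
    · cases h : splitNl t <;> simp

theorem splitOn_go_eq (fuel : Nat) (l cur : List Char) (acc : List (List Char))
    (h : l.length ≤ fuel) :
    PySem.Chars.splitOn.go ['\n'] fuel l cur acc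
      = acc.reverse ++ (splitNl l).modifyHead (cur.reverse ++ ·) := by
  induction fuel generalizing l cur acc with
  | zero =>
    have : l = [] := by cases l <;> simp_all
    subst this
    rw [PySem.Chars.splitOn.go.eq_def]
    simp [splitNl]
  | succ fuel ih =>
    cases l with
    | nil =>
      rw [PySem.Chars.splitOn.go.eq_def]
      simp [splitNl]
    | cons c rest =>
      rw [PySem.Chars.splitOn.go.eq_def]
      simp only [List.isPrefixOf]
      by_cases hc : c = '\n'
      · subst hc
        simp only [beq_self_eq_true, Bool.true_and, if_pos]
        rw [ih _ _ _ (by simpa using Nat.le_of_succ_le_succ (by simpa using h))]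
        rcases hs : splitNl rest with _ | ⟨hd, tl⟩
        · exact absurd hs (splitNl_ne_nil rest)
        · simp [splitNl, hs, List.modifyHead]
      · have hx : (('\n' == c) && true) = false := by simp [hc, BEq.comm]
        simp only [hx, Bool.false_eq_true, if_false]
        rw [ih rest (c :: cur) acc (by simpa using Nat.le_of_succ_le_succ (by simpa using h))]
        rcases hs : splitNl rest with _ | ⟨hd, tl⟩
        · exact absurd hs (splitNl_ne_nil rest)
        · simp [splitNl, hs, hc, List.modifyHead]

theorem splitOn_eq_splitNl (l : List Char) :
    PySem.Chars.splitOn l ['\n'] = splitNl l := by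
  unfold PySem.Chars.splitOn
  rw [splitOn_go_eq _ _ _ _ (Nat.le_succ _)]
  rcases hs : splitNl l with _ | ⟨hd, tl⟩
  · exact absurd hs (splitNl_ne_nil l)
  · simp [List.modifyHead]

-- total number of character positions covered by a list of lines
def totalLen (ls : List (List Char)) : Int := (ls.map (fun l => (l.length : Int) + 1)).sum

theorem totalLen_nonneg (ls : List (List Char)) : 0 ≤ totalLen ls := by
  induction ls with
  | nil => simp [totalLen]
  | cons l t ih => simp only [totalLen, List.map_cons, List.sum_cons] at *; omega

theorem totalLen_splitNl (l : List Char) : totalLen (splitNl l) = (l.length : Int) + 1 := by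
  induction l with
  | nil => simp [splitNl, totalLen]
  | cons c t ih =>
    by_cases hc : c = '\n'
    · subst hc
      rw [show splitNl ('\n' :: t) = [] :: splitNl t from by simp [splitNl]]
      simp only [totalLen, List.map_cons, List.sum_cons, List.length_cons, List.length_nil] at ih ⊢
      push_cast at ih ⊢
      omega
    · rcases hs : splitNl t with _ | ⟨hd, tl⟩
      · exact absurd hs (splitNl_ne_nil t)
      · rw [show splitNl (c :: t) = (c :: hd) :: tl from by simp [splitNl, hc, hs]]
        rw [hs] at ih
        simp only [totalLen, List.map_cons, List.sum_cons, List.length_cons] at ih ⊢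
        push_cast at ih ⊢
        omega

-- which line (0-based) an offset falls into
def idxIn : List (List Char) → Int → Int
  | [], _ => 0
  | l :: t, p => if p < (l.length : Int) + 1 then 0 else 1 + idxIn t (p - ((l.length : Int) + 1))

theorem idxIn_splitNl_cons (c : Char) (t : List Char) (p : Int) :
    idxIn (splitNl (c :: t)) p
      = if p < 1 then 0
        else (if c = '\n' then 1 else 0) + idxIn (splitNl t) (p - 1) := by
  by_cases hc : c = '\n'
  · subst hc
    rw [show splitNl ('\n' :: t) = [] :: splitNl t from by simp [splitNl]]
    simp only [idxIn, List.length_nil]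
    norm_num
  · rcases hs : splitNl t with _ | ⟨hd, tl⟩
    · exact absurd hs (splitNl_ne_nil t)
    · rw [show splitNl (c :: t) = (c :: hd) :: tl from by simp [splitNl, hc, hs]]
      simp only [idxIn, List.length_cons, hc, if_false]
      push_cast
      split_ifs with h1 h2 h3 <;> try omega
      · have harg : p - ((hd.length : Int) + 1 + 1) = p - 1 - ((hd.length : Int) + 1) := by omega
        rw [harg]
        ring

theorem idxIn_splitNl (l : List Char) (p : Nat) (hp : p ≤ l.length) :
    idxIn (splitNl l) (p : Int) = ((l.take p).count '\n' : Int) := by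
  induction l generalizing p with
  | nil =>
    have h0 : p = 0 := by simpa using hp
    subst h0
    simp [splitNl, idxIn]
  | cons c t ih =>
    rw [idxIn_splitNl_cons]
    cases p with
    | zero =>
      rw [if_pos (by norm_num)]
      simp
    | succ q =>
      have hq : q ≤ t.length := by simpa using hp
      rw [if_neg (by push_cast; omega)]
      rw [show ((q + 1 : Nat) : Int) - 1 = (q : Int) by push_cast; omega]
      rw [ih q hq, List.take_succ_cons, List.count_cons]
      by_cases hcc : c = '\n'
      · simp [hcc]
        omega
      · simp [hcc, show (c == '\n') = false by simp [hcc]]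

-- the inner per-character loop of A: what the dict answers afterwards
theorem innerA_get? (L : Nat) (d : PySem.Dict Int Int) (cur v p : Int) :
    ((PySem.List.pyRange 0 (L : Int) 1).foldl (fun d2 i => d2.insert (cur + i) v) d).get? p
      = if cur ≤ p ∧ p < cur + (L : Int) then some v else d.get? p := by
  induction L generalizing d with
  | zero =>
    rw [show ((0 : Nat) : Int) = 0 from rfl, PySem.List.pyRange_one_eq_nil (by omega)]
    simp only [List.foldl_nil]
    rw [if_neg (by omega)]
  | succ m ih =>
    rw [PySem.List.pyRange_zero_natCast] at *
    rw [List.range_succ, List.map_append, List.foldl_append]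
    simp only [List.map_cons, List.map_nil, List.foldl_cons, List.foldl_nil]
    rw [PySem.Dict.get?_insert, ih]
    by_cases hpe : p = cur + (m : Int)
    · rw [if_pos hpe, if_pos (by push_cast; omega)]
    · rw [if_neg hpe]
      by_cases hin : cur ≤ p ∧ p < cur + (m : Int)
      · rw [if_pos hin, if_pos (by push_cast at hin ⊢; omega)]
      · rw [if_neg hin, if_neg (by push_cast at hin ⊢; omega)]

-- the outer line loop of A: the full position → line dict
theorem dictA_get? (ls : List (List Char)) (j : Int) (d : PySem.Dict Int Int) (cur : Int)
    (hd : ∀ p, cur ≤ p → d.get? p = none) (p : Int) :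
    (((PySem.List.enumerate ls j).foldl (fun st q => pvA_buildLine st.1 st.2 q.1 q.2)
        (d, cur)).1).get? p
      = if cur ≤ p ∧ p < cur + totalLen ls then some (j + 1 + idxIn ls (p - cur))
        else d.get? p := by
  induction ls generalizing j d cur with
  | nil =>
    simp only [PySem.List.enumerate_nil, List.foldl_nil, totalLen, List.map_nil, List.sum_nil]
    rw [if_neg (by omega)]
  | cons l t ih =>
    rw [PySem.List.enumerate_cons, List.foldl_cons]
    have hstep : pvA_buildLine d cur j l
        = ((PySem.List.pyRange 0 ((l.length + 1 : Nat) : Int) 1).foldl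
            (fun d2 i => d2.insert (cur + i) (j + 1)) d,
           cur + ((l.length + 1 : Nat) : Int)) := by
      simp [pvA_buildLine]
    rw [hstep]
    have hd' : ∀ p', cur + ((l.length + 1 : Nat) : Int) ≤ p' →
        ((PySem.List.pyRange 0 ((l.length + 1 : Nat) : Int) 1).foldl
            (fun d2 i => d2.insert (cur + i) (j + 1)) d).get? p' = none := by
      intro p' hp'
      rw [innerA_get?]
      rw [if_neg (by push_cast at hp' ⊢; omega)]
      exact hd p' (by push_cast at hp'; omega)
    rw [ih (j + 1) _ _ hd', innerA_get?]
    have htn := totalLen_nonneg t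
    rw [show totalLen (l :: t) = ((l.length : Int) + 1) + totalLen t from by simp [totalLen]]
    by_cases h1 : cur + ((l.length + 1 : Nat) : Int) ≤ p ∧
        p < cur + ((l.length + 1 : Nat) : Int) + totalLen t
    · rw [if_pos h1, if_pos (by push_cast at h1 ⊢; omega)]
      simp only [idxIn]
      rw [if_neg (by push_cast at h1 ⊢; omega)]
      rw [show p - (cur + ((l.length + 1 : Nat) : Int)) = p - cur - ((l.length : Int) + 1) by
        push_cast; omega]
      congr 1
      ring
    · rw [if_neg h1]
      by_cases h2 : cur ≤ p ∧ p < cur + ((l.length + 1 : Nat) : Int)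
      · rw [if_pos h2, if_pos (by push_cast at h1 h2 ⊢; omega)]
        simp only [idxIn]
        rw [if_pos (by push_cast at h2 ⊢; omega)]
        norm_num
      · rw [if_neg h2, if_neg (by push_cast at h1 h2 ⊢; omega)]

-- turning a fold of fresh-key inserts into a map (both final loops have this shape)
theorem items_token_fold (xs : List Int) (f : Int → Int) :
    ((PySem.List.enumerate xs 0).foldl (fun t q => t.insert q.1 (f q.2))
        (PySem.Dict.empty : PySem.Dict Int Int)).items
      = (PySem.List.enumerate xs 0).map (fun q => (q.1, f q.2)) := by
  rw [PySem.Dict.items_foldl_insert_fresh (PySem.List.enumerate xs 0) (fun q => q.1)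
      (fun q => f q.2) PySem.Dict.empty (by intro a _; exact PySem.Dict.contains_empty _)
      (by rw [PySem.List.map_fst_enumerate]; exact PySem.List.nodup_pyRange_one _ _)]
  simp [PySem.Dict.empty]

-- value computed by A for one token position
def valA (code : String) (p : Int) : Int :=
  ((((PySem.List.enumerate (PySem.Chars.splitOn code.toList ['\n']) 0).foldl
      (fun st q => pvA_buildLine st.1 st.2 q.1 q.2)
      ((PySem.Dict.empty : PySem.Dict Int Int), 0)).1).get? p).getD 1

-- value computed by B for one token position
def valB (code : String) (p : Int) : Int :=
  if 0 ≤ p ∧ p ≤ (code.toList.length : Int) then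
    PySem.List.pyGetD
      ((code.toList.foldl
          (fun (st : List Int × Int) c =>
            let cnt := if c = '\n' then st.2 + 1 else st.2
            (st.1 ++ [cnt], cnt))
          ([0], 0)).1) p 0 + 1
  else 1

-- the prefix pass of B: the list of newline counts of all prefixes, plus the running count
theorem pref_pair (l : List Char) :
    l.foldl
        (fun (st : List Int × Int) c =>
          let cnt := if c = '\n' then st.2 + 1 else st.2
          (st.1 ++ [cnt], cnt))
        ([0], 0)
      = ((List.range (l.length + 1)).map (fun i => ((l.take i).count '\n' : Int)),
         ((l.count '\n' : Nat) : Int)) := by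
  induction l using List.reverseRecOn with
  | nil => simp
  | append_singleton l c ih =>
    rw [List.foldl_append, ih]
    simp only [List.foldl_cons, List.foldl_nil]
    have hsnd : (if c = '\n' then ((l.count '\n' : Nat) : Int) + 1 else ((l.count '\n' : Nat) : Int))
        = (((l ++ [c]).count '\n' : Nat) : Int) := by
      rw [List.count_append]
      by_cases hc : c = '\n' <;> simp [hc]
    refine Prod.ext ?_ (by simpa using hsnd)
    simp only []
    rw [show (l ++ [c]).length = l.length + 1 by simp]
    rw [List.range_succ (n := l.length + 1), List.map_append, List.map_singleton]
    congr 1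
    · apply List.map_congr_left
      intro i hi
      rw [List.take_append_of_le_length (by simp at hi; omega)]
    · rw [List.take_of_length_le (by simp)]
      rw [← hsnd]

theorem pref_fst (l : List Char) :
    (l.foldl
        (fun (st : List Int × Int) c =>
          let cnt := if c = '\n' then st.2 + 1 else st.2
          (st.1 ++ [cnt], cnt))
        ([0], 0)).1
      = (List.range (l.length + 1)).map (fun i => ((l.take i).count '\n' : Int)) := by
  rw [pref_pair]

theorem pv_match_insert (t : PySem.Dict Int Int) (k : Int) (o : Option Int) :
    (match o with
      | some v => t.insert k v
      | none => t.insert k 1) = t.insert k (o.getD 1) := by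
  cases o <;> rfl

theorem valA_eq_valB (code : String) (p : Int) : valA code p = valB code p := by
  unfold valA valB
  rw [splitOn_eq_splitNl]
  rw [dictA_get? _ 0 _ 0 (by intro p' _; exact PySem.Dict.get?_empty p') p]
  rw [totalLen_splitNl]
  by_cases h : 0 ≤ p ∧ p ≤ (code.toList.length : Int)
  · rw [if_pos (by omega), Option.getD_some, if_pos h]
    have hle : p.toNat ≤ code.toList.length := by omega
    rw [show p - 0 = ((p.toNat : Nat) : Int) by omega]
    rw [idxIn_splitNl _ _ hle]
    rw [pref_fst]
    have hget : ∀ (k : Nat), k < code.toList.length + 1 →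
        PySem.List.pyGetD
          ((List.range (code.toList.length + 1)).map
            (fun i => ((code.toList.take i).count '\n' : Int))) (k : Int) 0
          = ((code.toList.take k).count '\n' : Int) := by
      intro k hk
      rw [PySem.List.pyGetD_natCast,
          List.getD_eq_getElem _ _ (by rw [List.length_map, List.length_range]; omega)]
      simp
    conv_rhs => rw [show p = ((p.toNat : Nat) : Int) by omega]
    rw [hget p.toNat (by omega)]
    omega
  · rw [if_neg (by omega), PySem.Dict.get?_empty, Option.getD_none, if_neg h]

theorem map_tokens_to_lines_py_eq (code : String) (char_positions : List Int) :
    map_tokens_to_lines_py code char_positions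
      = map_tokens_to_lines_py_alt code char_positions := by
  unfold map_tokens_to_lines_py map_tokens_to_lines_py_alt
  simp only []
  have hA : (fun (t : PySem.Dict Int Int) (q : Int × Int) =>
      match (((PySem.List.enumerate (PySem.Chars.splitOn code.toList ['\n']) 0).foldl
          (fun st q => pvA_buildLine st.1 st.2 q.1 q.2)
          ((PySem.Dict.empty : PySem.Dict Int Int), 0)).1).get? q.2 with
      | some v => t.insert q.1 v
      | none => t.insert q.1 1)
      = fun (t : PySem.Dict Int Int) (q : Int × Int) => t.insert q.1 (valA code q.2) := by
    funext t q
    unfold valA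
    exact pv_match_insert t q.1 _
  have hB : (fun (t : PySem.Dict Int Int) (q : Int × Int) =>
      if 0 ≤ q.2 ∧ q.2 ≤ (code.toList.length : Int) then
        t.insert q.1 (PySem.List.pyGetD
          ((code.toList.foldl
              (fun (st : List Int × Int) c =>
                let cnt := if c = '\n' then st.2 + 1 else st.2
                (st.1 ++ [cnt], cnt))
              ([0], 0)).1) q.2 0 + 1)
      else t.insert q.1 1)
      = fun (t : PySem.Dict Int Int) (q : Int × Int) => t.insert q.1 (valB code q.2) := by
    funext t q
    unfold valB
    split <;> rfl
  rw [hA, hB, items_token_fold, items_token_fold]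
  have : ∀ p, valA code p = valB code p := valA_eq_valB code
  simp only [funext fun p => valA_eq_valB code p]

-- ===== VERDICT (by name: the statement is the Claim_ definition above) =====
theorem map_tokens_to_lines_py_spec : Claim_equal_map_tokens_to_lines_py := by
  intro code char_positions _
  unfold Spec_map_tokens_to_lines_py
  exact map_tokens_to_lines_py_eq code char_positions
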